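-- pv_equiv track=rewrite | github.com/Storm-fyre/Glo-bot | code.py | refine_distance_with_tolerance
-- ===== SOURCE A (Python) =====
-- DISTANCE_UNKNOWN = 9999999
--
-- MISCHIEVOUS_COUNTRIES = {
--     "canada": {
--         "tolerance": 500,
--         "distance_threshold": 2500
--     },
--     # Add more mischievous countries here as needed
-- }
--
-- def get_tolerance(guess_country, dist_value):
--     """
--     Returns the tolerance based on the guess_country and the reported distance.
--     For mischievous countries, applies custom tolerance rules.
--     Otherwise, returns the default tolerance.
--     """
--     if guess_country in MISCHIEVOUS_COUNTRIES:
--         config = MISCHIEVOUS_COUNTRIES[guess_country]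
--         if dist_value > config["distance_threshold"]:
--             return config["tolerance"]
--     return 50  # Default tolerance
--
-- def match_distance_with_tolerance(actual_dist, reported_dist, guess_country):
--     """
--     Check if 'actual_dist' is within ±some tolerance of 'reported_dist',
--     where that tolerance depends on 'reported_dist' and the guess_country.
--     """
--     tol = get_tolerance(guess_country, reported_dist)
--     low = reported_dist - tol
--     high = reported_dist + tol
--     return (low <= actual_dist <= high)
--
-- def refine_distance_with_tolerance(distance_map, possible_targets, guess_country, reported_dist):
--     """
--     Filter possible_targets to those for which distance_map[guess_country][country]
--     is consistent with reported_dist ± tolerance.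
--     """
--     new_possible = set()
--     for c in possible_targets:
--         dist_c = distance_map[guess_country].get(c, DISTANCE_UNKNOWN)
--         if dist_c == DISTANCE_UNKNOWN:
--             # skip
--             continue
--         if match_distance_with_tolerance(dist_c, reported_dist, guess_country):
--             new_possible.add(c)
--     return new_possible
-- ===== SOURCE B (Python) =====
-- DISTANCE_UNKNOWN = 9999999
--
-- MISCHIEVOUS_COUNTRIES = {
--     "canada": {
--         "tolerance": 500,
--         "distance_threshold": 2500
--     },
-- }
--
-- def refine_distance_with_tolerance(distance_map, possible_targets, guess_country, reported_dist):
--     # Compute the tolerance window once, build the set of valid countries by a single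
--     # pass over the distance map's row, then intersect with the target set.
--     cfg = MISCHIEVOUS_COUNTRIES.get(guess_country)
--     tol = cfg["tolerance"] if cfg is not None and reported_dist > cfg["distance_threshold"] else 50
--     low, high = reported_dist - tol, reported_dist + tol
--     inner = distance_map[guess_country]
--     valid = {c for c, d in inner.items() if d != DISTANCE_UNKNOWN and low <= d <= high}
--     return {c for c in possible_targets if c in valid}
-- ===== Notes on version B (the rewrite author's own statement) =====
-- stated objective: alternative
-- what changed: B computes the tolerance window once, builds the set of in-window countries in a single pass over the distance map's row, and then intersects it with the targets, instead of A's per-target map lookup plus per-target tolerance recomputation.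
-- outside the precondition, e.g. on refine_distance_with_tolerance({}, set(), 'x', 0): A returns set(), B raises KeyError
import Mathlib
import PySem

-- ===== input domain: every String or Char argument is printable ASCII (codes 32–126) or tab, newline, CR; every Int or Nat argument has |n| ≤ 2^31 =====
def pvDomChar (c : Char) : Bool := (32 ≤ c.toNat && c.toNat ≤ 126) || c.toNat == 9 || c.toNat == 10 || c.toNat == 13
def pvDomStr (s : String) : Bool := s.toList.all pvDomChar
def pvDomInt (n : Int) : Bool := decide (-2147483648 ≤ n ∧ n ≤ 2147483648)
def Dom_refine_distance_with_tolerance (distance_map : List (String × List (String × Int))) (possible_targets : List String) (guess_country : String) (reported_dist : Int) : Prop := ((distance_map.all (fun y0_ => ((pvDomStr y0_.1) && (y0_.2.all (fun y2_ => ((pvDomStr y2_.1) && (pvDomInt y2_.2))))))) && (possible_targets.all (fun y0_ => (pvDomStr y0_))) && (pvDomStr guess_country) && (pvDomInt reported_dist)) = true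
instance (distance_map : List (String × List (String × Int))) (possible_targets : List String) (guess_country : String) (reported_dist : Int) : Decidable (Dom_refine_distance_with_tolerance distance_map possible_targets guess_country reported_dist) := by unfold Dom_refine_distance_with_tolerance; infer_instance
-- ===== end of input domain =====

-- B computes the tolerance window once, builds the set of in-window countries in one pass
-- over the distance map's row, then intersects with the targets (alternative decomposition).

-- ===== PORT A =====
def pvGetToleranceA (guess_country : String) (dist_value : Int) : Int :=
  -- MISCHIEVOUS_COUNTRIES has the single key "canada" (tolerance 500, threshold 2500)
  if guess_country == "canada" then
    if dist_value > 2500 then 500 else 50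
  else 50

def pvMatchA (actual_dist reported_dist : Int) (guess_country : String) : Bool :=
  let tol := pvGetToleranceA guess_country reported_dist
  let low := reported_dist - tol
  let high := reported_dist + tol
  decide (low ≤ actual_dist ∧ actual_dist ≤ high)

def refine_distance_with_tolerance (distance_map : List (String × List (String × Int))) (possible_targets : List String) (guess_country : String) (reported_dist : Int) : List String :=
  -- distance_map[guess_country] raises KeyError when absent: excluded by Pre_
  let inner : PySem.Dict String Int := PySem.Dict.mk ((PySem.Dict.mk distance_map).getD guess_country [])
  possible_targets.foldl (fun new_possible c =>
    let dist_c := inner.getD c 9999999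
    if dist_c == 9999999 then new_possible
    else if pvMatchA dist_c reported_dist guess_country then PySem.Set.add new_possible c
    else new_possible) PySem.Set.empty

-- ===== PORT B =====
def refine_distance_with_tolerance_alt (distance_map : List (String × List (String × Int))) (possible_targets : List String) (guess_country : String) (reported_dist : Int) : List String :=
  let tol : Int := if guess_country == "canada" && decide (reported_dist > 2500) then 500 else 50
  let low := reported_dist - tol
  let high := reported_dist + tol
  let inner : List (String × Int) := (PySem.Dict.mk distance_map).getD guess_country []
  let valid : PySem.Set String :=
    PySem.Set.ofList ((inner.filter (fun p => p.2 != 9999999 && decide (low ≤ p.2) && decide (p.2 ≤ high))).map Prod.fst)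
  PySem.Set.ofList (possible_targets.filter (fun c => PySem.Set.contains valid c))

-- ===== PRECONDITION & SPEC =====
-- Pre_ excludes (a) guess_country absent from distance_map, where B's hoisted row lookup raises KeyError
-- (A raises too unless possible_targets is empty, where A accidentally returns the empty set), and
-- (b) duplicate keys inside a row of distance_map, which cannot arise from a Python dict.
def Pre_refine_distance_with_tolerance (distance_map : List (String × List (String × Int))) (possible_targets : List String) (guess_country : String) (reported_dist : Int) : Prop :=
  guess_country ∈ distance_map.map Prod.fst ∧ ∀ p ∈ distance_map, (p.2.map Prod.fst).Nodup
instance (distance_map : List (String × List (String × Int))) (possible_targets : List String) (guess_country : String) (reported_dist : Int) : Decidable (Pre_refine_distance_with_tolerance distance_map possible_targets guess_country reported_dist) := by unfold Pre_refine_distance_with_tolerance; infer_instance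

def pvWitness_refine_distance_with_tolerance : (List (String × List (String × Int))) × List String × String × Int :=
  ([("canada", [("ghana", 4000), ("peru", 9999999)]), ("peru", [])], ["ghana", "peru"], "canada", 3700)

def Spec_refine_distance_with_tolerance (distance_map : List (String × List (String × Int))) (possible_targets : List String) (guess_country : String) (reported_dist : Int) (out : List String) : Prop := out = refine_distance_with_tolerance_alt distance_map possible_targets guess_country reported_dist
instance (distance_map : List (String × List (String × Int))) (possible_targets : List String) (guess_country : String) (reported_dist : Int) (out : List String) : Decidable (Spec_refine_distance_with_tolerance distance_map possible_targets guess_country reported_dist out) := by unfold Spec_refine_distance_with_tolerance; infer_instance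

-- ===== CLAIM (what is proved, stated in full; the proofs are below) =====
def Claim_equal_refine_distance_with_tolerance : Prop := ∀ (distance_map : List (String × List (String × Int))) (possible_targets : List String) (guess_country : String) (reported_dist : Int), Dom_refine_distance_with_tolerance distance_map possible_targets guess_country reported_dist → Pre_refine_distance_with_tolerance distance_map possible_targets guess_country reported_dist → Spec_refine_distance_with_tolerance distance_map possible_targets guess_country reported_dist (refine_distance_with_tolerance distance_map possible_targets guess_country reported_dist)

-- ===== LEMMAS AND PROOFS =====

-- the per-distance acceptance test, shared shape of both sides
def pvCond (low high d : Int) : Bool := !(d == 9999999) && decide (low ≤ d) && decide (d ≤ high)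

-- A's tolerance equals B's one-expression tolerance
lemma pvTol_eq (gc : String) (rd : Int) :
    pvGetToleranceA gc rd = (if gc == "canada" && decide (rd > 2500) then 500 else 50) := by
  unfold pvGetToleranceA
  by_cases h : gc == "canada" <;> by_cases h2 : rd > 2500 <;> simp [h, h2]

lemma pvGetD_not_mem (c : String) : ∀ (l : List (String × Int)), c ∉ l.map Prod.fst →
    (PySem.Dict.mk l).getD c 9999999 = 9999999 := by
  intro l
  induction l with
  | nil => intro _; simp [PySem.Dict.getD_eq_get?_getD, PySem.Dict.get?]
  | cons p rest ih =>
    obtain ⟨k, v⟩ := p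
    intro h
    simp only [List.map_cons, List.mem_cons, not_or] at h
    have hne : (k == c) = false := by simp; exact fun e => h.1 e.symm
    rw [PySem.Dict.getD_eq_get?_getD, PySem.Dict.get?_mk_cons, hne]
    simp only [Bool.false_eq_true, if_false]
    rw [← PySem.Dict.getD_eq_get?_getD]
    exact ih h.2

-- membership in B's valid set ↔ A's lookup passes the test
lemma pvMem_valid (low high : Int) (c : String) : ∀ (l : List (String × Int)),
    (l.map Prod.fst).Nodup →
    ((c ∈ (l.filter (fun p => pvCond low high p.2)).map Prod.fst) ↔
      pvCond low high ((PySem.Dict.mk l).getD c 9999999) = true) := by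
  intro l
  induction l with
  | nil =>
    intro _
    simp [PySem.Dict.getD_eq_get?_getD, PySem.Dict.get?, pvCond]
  | cons p rest ih =>
    obtain ⟨k, v⟩ := p
    intro hn
    simp only [List.map_cons, List.nodup_cons] at hn
    have hgetD : (PySem.Dict.mk ((k, v) :: rest)).getD c 9999999
        = if k == c then v else (PySem.Dict.mk rest).getD c 9999999 := by
      rw [PySem.Dict.getD_eq_get?_getD, PySem.Dict.get?_mk_cons]
      split <;> simp [← PySem.Dict.getD_eq_get?_getD]
    by_cases hk : k = c
    · subst hk
      have hrest : (PySem.Dict.mk rest).getD k 9999999 = 9999999 := pvGetD_not_mem _ _ hn.1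
      by_cases hc : pvCond low high v = true
      · simp [hgetD, List.filter_cons, hc]
      · have hnm : k ∉ (rest.filter (fun q => pvCond low high q.2)).map Prod.fst := by
          intro hmem
          exact hn.1 (by
            rcases List.mem_map.mp hmem with ⟨q, hq, hq1⟩
            exact List.mem_map.mpr ⟨q, List.mem_of_mem_filter hq, hq1⟩)
        rw [List.filter_cons, if_neg hc, hgetD, if_pos (by simp)]
        exact iff_of_false hnm hc
    · have hbeq : (k == c) = false := by simp [hk]
      by_cases hc : pvCond low high v = true
      · simp [hgetD, hbeq, List.filter_cons, hc, Ne.symm hk, ih hn.2]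
      · simp [hgetD, hbeq, List.filter_cons, hc, ih hn.2]

-- an add-if-accepted fold is the fold of Set.add over the filtered list
lemma pvFoldl_filter (P : String → Bool) : ∀ (pt : List String) (acc : PySem.Set String),
    pt.foldl (fun acc c => if P c then PySem.Set.add acc c else acc) acc
      = (pt.filter P).foldl PySem.Set.add acc := by
  intro pt
  induction pt with
  | nil => intro acc; rfl
  | cons c rest ih =>
    intro acc
    by_cases hc : P c = true <;> simp [List.filter_cons, hc, ih]

-- the two bodies agree once the row (inner) and its key-nodup are fixed
lemma pvMain (gc : String) (rd : Int) (inner : List (String × Int))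
    (hn : (inner.map Prod.fst).Nodup) (pt : List String) :
    pt.foldl (fun new_possible c =>
        let dist_c := (PySem.Dict.mk inner).getD c 9999999
        if dist_c == 9999999 then new_possible
        else if pvMatchA dist_c rd gc then PySem.Set.add new_possible c
        else new_possible) PySem.Set.empty
    = PySem.Set.ofList (pt.filter (fun c => PySem.Set.contains
        (PySem.Set.ofList ((inner.filter (fun p => p.2 != 9999999 &&
          decide (rd - (if gc == "canada" && decide (rd > 2500) then 500 else 50) ≤ p.2) &&
          decide (p.2 ≤ rd + (if gc == "canada" && decide (rd > 2500) then 500 else 50)))).map Prod.fst)) c)) := by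
  set tol : Int := if gc == "canada" && decide (rd > 2500) then 500 else 50 with htol
  have hcondfun : (fun p : String × Int => p.2 != 9999999 && decide (rd - tol ≤ p.2) && decide (p.2 ≤ rd + tol))
      = fun p => pvCond (rd - tol) (rd + tol) p.2 := by
    funext p; simp [pvCond, bne]
  have hstep : (fun (acc : PySem.Set String) (c : String) =>
      let dist_c := (PySem.Dict.mk inner).getD c 9999999
      if dist_c == 9999999 then acc
      else if pvMatchA dist_c rd gc then PySem.Set.add acc c else acc)
      = fun acc c => if pvCond (rd - tol) (rd + tol) ((PySem.Dict.mk inner).getD c 9999999)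
          then PySem.Set.add acc c else acc := by
    funext acc c
    simp only [pvCond, pvMatchA, pvTol_eq, ← htol]
    by_cases h9 : ((PySem.Dict.mk inner).getD c 9999999 == 9999999) = true <;>
      by_cases hl : rd - tol ≤ (PySem.Dict.mk inner).getD c 9999999 <;>
      by_cases hh : (PySem.Dict.mk inner).getD c 9999999 ≤ rd + tol <;>
      simp [h9, hl, hh]
  rw [hstep, pvFoldl_filter, hcondfun]
  have hPQ : (fun c => pvCond (rd - tol) (rd + tol) ((PySem.Dict.mk inner).getD c 9999999))
      = fun c => PySem.Set.contains
          (PySem.Set.ofList ((inner.filter (fun p => pvCond (rd - tol) (rd + tol) p.2)).map Prod.fst)) c := by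
    funext c
    rw [Bool.eq_iff_iff]
    have h2 : PySem.Set.contains
        (PySem.Set.ofList ((inner.filter (fun p => pvCond (rd - tol) (rd + tol) p.2)).map Prod.fst)) c = true
        ↔ c ∈ (inner.filter (fun p => pvCond (rd - tol) (rd + tol) p.2)).map Prod.fst := by
      simp [PySem.Set.contains, PySem.Set.mem_ofList]
    rw [h2]
    exact (pvMem_valid (rd - tol) (rd + tol) c inner hn).symm
  rw [hPQ, PySem.Set.ofList]
  rfl

-- ===== VERDICT (by name: the statement is the Claim_ definition above) =====
theorem refine_distance_with_tolerance_spec : Claim_equal_refine_distance_with_tolerance := by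
  unfold Claim_equal_refine_distance_with_tolerance
  intro dm pt gc rd _ hpre
  unfold Spec_refine_distance_with_tolerance refine_distance_with_tolerance refine_distance_with_tolerance_alt
  have hnodup : ((((PySem.Dict.mk dm).getD gc []).map Prod.fst) : List String).Nodup := by
    rw [PySem.Dict.getD_eq_get?_getD]
    cases hg : (PySem.Dict.mk dm).get? gc with
    | none => simp
    | some l =>
      have hmem : (gc, l) ∈ (PySem.Dict.mk dm).items := PySem.Dict.mem_items_of_get?_eq_some _ hg
      exact hpre.2 (gc, l) hmem
  exact pvMain gc rd ((PySem.Dict.mk dm).getD gc []) hnodup pt
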